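-- pv_equiv track=rewrite | github.com/williams1031/Alertas_procesos | backend/app.py | split_responsables
-- ===== SOURCE A (Python) =====
-- from typing import Any
--
-- def split_responsables(value: Any) -> list[str]:
--     text = str(value or "").strip()
--     if not text or text.lower() in {"nan", "none"}:
--         return []
--     parts = [text]
--     separators = [";", "/", ",", "&", " y "]
--     for sep in separators:
--         new_parts: list[str] = []
--         for part in parts:
--             if sep in part:
--                 new_parts.extend(part.split(sep))
--             else:
--                 new_parts.append(part)
--         parts = new_parts
--     cleaned = [p.strip() for p in parts if p.strip()]
--     return list(dict.fromkeys(cleaned))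
-- ===== SOURCE B (Python) =====
-- def split_responsables(value):
--     text = str(value or "").strip()
--     if not text or text.lower() in {"nan", "none"}:
--         return []
--     # single left-to-right scan over the characters instead of five sequential
--     # split passes: cut at any of ';', '/', ',', '&' or the token " y "
--     tokens = []
--     cur = []
--     i = 0
--     n = len(text)
--     while i < n:
--         ch = text[i]
--         if ch in ";/,&":
--             tokens.append("".join(cur))
--             cur = []
--             i += 1
--         elif text.startswith(" y ", i):
--             tokens.append("".join(cur))
--             cur = []
--             i += 3
--         else:
--             cur.append(ch)
--             i += 1
--     tokens.append("".join(cur))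
--     # fused strip + order-preserving dedupe
--     seen = set()
--     out = []
--     for tok in tokens:
--         t = tok.strip()
--         if t and t not in seen:
--             seen.add(t)
--             out.append(t)
--     return out
-- ===== Notes on version B (the rewrite author's own statement) =====
-- stated objective: alternative
-- what changed: Replaces A's five sequential split passes (one per separator, each rebuilding the whole parts list) and the trailing dict.fromkeys dedupe with a single left-to-right scan that cuts a token at any of the four single-character separators or at the space-padded y word, fusing the strip/filter/order-preserving dedupe into one loop over the tokens.
import Mathlib
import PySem

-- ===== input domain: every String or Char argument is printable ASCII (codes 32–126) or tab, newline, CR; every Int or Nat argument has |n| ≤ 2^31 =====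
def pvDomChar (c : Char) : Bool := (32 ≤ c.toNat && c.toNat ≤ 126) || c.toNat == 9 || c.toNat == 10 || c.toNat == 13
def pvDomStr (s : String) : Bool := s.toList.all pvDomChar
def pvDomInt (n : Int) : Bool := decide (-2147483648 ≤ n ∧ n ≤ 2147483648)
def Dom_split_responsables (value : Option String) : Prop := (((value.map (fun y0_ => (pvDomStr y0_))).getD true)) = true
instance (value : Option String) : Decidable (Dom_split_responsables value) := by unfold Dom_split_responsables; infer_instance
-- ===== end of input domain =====

-- B replaces A's five sequential split passes by one left-to-right scan that cuts at any
-- separator, fusing the strip/dedupe into the same pass (objective: alternative).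

-- ===== PORT A =====
-- literal transliteration of A: five sequential split passes, then strip/filter, then dedupe
def split_responsables (value : Option String) : List String :=
  let text : List Char := PySem.Chars.strip (value.getD "").toList
  if text = [] ∨ PySem.Chars.lower text = "nan".toList ∨ PySem.Chars.lower text = "none".toList then
    []
  else
    let parts := [[';'], ['/'], [','], ['&'], [' ', 'y', ' ']].foldl
      (fun parts sep =>
        parts.foldl (fun np part =>
          if PySem.Chars.isIn sep part then np ++ PySem.Chars.splitOn part sep
          else np ++ [part]) []) [text]
    let cleaned := (parts.filter (fun p => PySem.Chars.strip p ≠ [])).map PySem.Chars.strip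
    (PySem.List.dedup cleaned).map (fun cs => String.ofList cs)

-- ===== PORT B =====
-- B's while-loop tokenizer: one scan, accumulators (tokens so far, current token)
def pvLoopB : List Char → List (List Char) → List Char → List (List Char)
  | [], toks, cur => toks ++ [cur]
  | c :: r, toks, cur =>
    if c = ';' ∨ c = '/' ∨ c = ',' ∨ c = '&' then pvLoopB r (toks ++ [cur]) []
    else if List.isPrefixOf [' ', 'y', ' '] (c :: r) then pvLoopB (r.drop 2) (toks ++ [cur]) []
    else pvLoopB r toks (cur ++ [c])
  termination_by l _ _ => l.length
  decreasing_by all_goals (simp [List.length_drop] <;> omega)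

def split_responsables_alt (value : Option String) : List String :=
  let text : List Char := PySem.Chars.strip (value.getD "").toList
  if text = [] ∨ PySem.Chars.lower text = "nan".toList ∨ PySem.Chars.lower text = "none".toList then
    []
  else
    let tokens := pvLoopB text [] []
    let res := tokens.foldl
      (fun (acc : PySem.Set (List Char) × List (List Char)) tok =>
        let t := PySem.Chars.strip tok
        if t ≠ [] ∧ acc.1.contains t = false then (PySem.Set.add acc.1 t, acc.2 ++ [t])
        else acc)
      (PySem.Set.empty, [])
    res.2.map (fun cs => String.ofList cs)

-- ===== PRECONDITION & SPEC =====
def Spec_split_responsables (value : Option String) (out : List String) : Prop := out = split_responsables_alt value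
instance (value : Option String) (out : List String) : Decidable (Spec_split_responsables value out) := by unfold Spec_split_responsables; infer_instance

-- ===== CLAIM (what is proved, stated in full; the proofs are below) =====
def Claim_equal_split_responsables : Prop := ∀ (value : Option String), Dom_split_responsables value → Spec_split_responsables value (split_responsables value)

-- ===== LEMMAS AND PROOFS =====

-- prepend a chunk onto the first token of a token list
def pvConsTok (x : List Char) : List (List Char) → List (List Char)
  | [] => [x]
  | h :: t => (x ++ h) :: t

-- fuel-free reformulation of PySem.Chars.splitOn (sep ≠ [])
def pvTokOn (sep : List Char) (hs : sep ≠ []) : List Char → List (List Char)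
  | [] => [[]]
  | c :: r =>
    if sep.isPrefixOf (c :: r) then [] :: pvTokOn sep hs (List.drop sep.length (c :: r))
    else pvConsTok [c] (pvTokOn sep hs r)
  termination_by l => l.length
  decreasing_by all_goals (have : 1 ≤ sep.length := List.length_pos_iff.mpr hs; simp [List.length_drop] <;> omega)

-- recursive tokenizer that pvLoopB's accumulator loop computes
def pvScan : List Char → List (List Char)
  | [] => [[]]
  | c :: r =>
    if c = ';' ∨ c = '/' ∨ c = ',' ∨ c = '&' then [] :: pvScan r
    else if List.isPrefixOf [' ', 'y', ' '] (c :: r) then [] :: pvScan (r.drop 2)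
    else pvConsTok [c] (pvScan r)
  termination_by l => l.length
  decreasing_by all_goals (simp [List.length_drop] <;> omega)

-- A's nested splits, innermost last
def pvChain1 (l : List Char) : List (List Char) := PySem.Chars.splitOn l [' ', 'y', ' ']
def pvChain2 (l : List Char) : List (List Char) := (PySem.Chars.splitOn l ['&']).flatMap pvChain1
def pvChain3 (l : List Char) : List (List Char) := (PySem.Chars.splitOn l [',']).flatMap pvChain2
def pvChain4 (l : List Char) : List (List Char) := (PySem.Chars.splitOn l ['/']).flatMap pvChain3
def pvChain5 (l : List Char) : List (List Char) := (PySem.Chars.splitOn l [';']).flatMap pvChain4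

theorem pvConsTok_consTok (a b : List Char) (X : List (List Char)) :
    pvConsTok a (pvConsTok b X) = pvConsTok (a ++ b) X := by
  cases X <;> simp [pvConsTok]

theorem pvConsTok_ne_nil (a : List Char) (X : List (List Char)) : pvConsTok a X ≠ [] := by
  cases X <;> simp [pvConsTok]

theorem pvConsTok_append (a : List Char) (X Y : List (List Char)) (hX : X ≠ []) :
    pvConsTok a X ++ Y = pvConsTok a (X ++ Y) := by
  cases X with
  | nil => exact absurd rfl hX
  | cons h t => simp [pvConsTok]

theorem pvTokOn_ne_nil (sep : List Char) (hs : sep ≠ []) (l : List Char) :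
    pvTokOn sep hs l ≠ [] := by
  induction l using pvTokOn.induct sep hs with
  | case1 => simp [pvTokOn]
  | case2 c r hp ih => simp [pvTokOn, hp]
  | case3 c r hp ih => simp [pvTokOn, hp]; exact pvConsTok_ne_nil _ _

theorem pvGo_eq (sep : List Char) (hs : sep ≠ []) :
    ∀ (fuel : Nat) (l cur : List Char) (acc : List (List Char)), l.length < fuel →
    PySem.Chars.splitOn.go sep fuel l cur acc = acc.reverse ++ pvConsTok cur.reverse (pvTokOn sep hs l) := by
  intro fuel
  induction fuel with
  | zero => intro l cur acc h; omega
  | succ f ih =>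
    intro l cur acc h
    cases l with
    | nil => simp [PySem.Chars.splitOn.go, pvTokOn, pvConsTok]
    | cons c r =>
      rw [PySem.Chars.splitOn.go]
      by_cases hp : sep.isPrefixOf (c :: r)
      · simp only [hp, if_true]
        have hk : 1 ≤ sep.length := List.length_pos_iff.mpr hs
        have hlen : (List.drop sep.length (c :: r)).length < f := by
          simp [List.length_drop]; simp at h; omega
        rw [ih _ _ _ hlen]
        have hne := pvTokOn_ne_nil sep hs (List.drop sep.length (c :: r))
        rw [pvTokOn]; simp only [hp, if_true]
        cases hX : pvTokOn sep hs (List.drop sep.length (c :: r)) with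
        | nil => exact absurd hX hne
        | cons a b => simp [pvConsTok]
      · simp only [hp, if_false]
        have hlen : r.length < f := by simp at h; omega
        rw [ih _ _ _ hlen]
        rw [pvTokOn]; simp only [hp, if_false]
        have hne := pvTokOn_ne_nil sep hs r
        cases hX : pvTokOn sep hs r with
        | nil => exact absurd hX hne
        | cons a b => simp [pvConsTok]

theorem pvSplitOn_eq (sep : List Char) (hs : sep ≠ []) (l : List Char) :
    PySem.Chars.splitOn l sep = pvTokOn sep hs l := by
  have h := pvGo_eq sep hs (l.length + 1) l [] [] (by omega)
  have hne := pvTokOn_ne_nil sep hs l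
  unfold PySem.Chars.splitOn
  rw [h]
  cases hX : pvTokOn sep hs l with
  | nil => exact absurd hX hne
  | cons a b => simp [pvConsTok]

-- splitOn recurrences
theorem pvSplitOn_nil (sep : List Char) (hs : sep ≠ []) : PySem.Chars.splitOn [] sep = [[]] := by
  rw [pvSplitOn_eq sep hs]; simp [pvTokOn]

theorem pvSplitOn_pos (sep : List Char) (hs : sep ≠ []) (c : Char) (r : List Char)
    (hp : sep.isPrefixOf (c :: r)) :
    PySem.Chars.splitOn (c :: r) sep = [] :: PySem.Chars.splitOn (List.drop sep.length (c :: r)) sep := by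
  rw [pvSplitOn_eq sep hs, pvSplitOn_eq sep hs]
  rw [pvTokOn]; simp [hp]

theorem pvSplitOn_neg (sep : List Char) (hs : sep ≠ []) (c : Char) (r : List Char)
    (hp : ¬ sep.isPrefixOf (c :: r)) :
    PySem.Chars.splitOn (c :: r) sep = pvConsTok [c] (PySem.Chars.splitOn r sep) := by
  rw [pvSplitOn_eq sep hs, pvSplitOn_eq sep hs]
  rw [pvTokOn]; simp [hp]

theorem pvSplitOn_ne_nil (sep : List Char) (hs : sep ≠ []) (l : List Char) :
    PySem.Chars.splitOn l sep ≠ [] := by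
  rw [pvSplitOn_eq sep hs]; exact pvTokOn_ne_nil sep hs l

-- a string without the separator is a single token
theorem pvSplitOn_single (sep : List Char) (hs : sep ≠ []) (l : List Char)
    (h : PySem.Chars.isIn sep l = false) : PySem.Chars.splitOn l sep = [l] := by
  rw [pvSplitOn_eq sep hs]
  induction l using pvTokOn.induct sep hs with
  | case1 => simp [pvTokOn]
  | case2 c r hp ih =>
    exfalso
    have hpre : sep <+: (c :: r) := List.isPrefixOf_iff_prefix.mp hp
    have : PySem.Chars.isIn sep (c :: r) = true :=
      (PySem.Chars.isIn_iff_infix sep (c :: r)).mpr hpre.isInfix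
    simp [this] at h
  | case3 c r hp ih =>
    have hr : PySem.Chars.isIn sep r = false := by
      rw [PySem.Chars.isIn_eq_false_iff] at h ⊢
      intro hinf; exact h (List.infix_cons hinf)
    rw [pvTokOn]; simp only [hp, if_false]
    rw [ih hr]; simp [pvConsTok]

-- the head token of a split is a prefix of the input
theorem pvSplitOn_head_prefix (sep : List Char) (hs : sep ≠ []) (l : List Char) (h : List Char)
    (t : List (List Char)) (he : PySem.Chars.splitOn l sep = h :: t) : h <+: l := by
  rw [pvSplitOn_eq sep hs] at he
  induction l using pvTokOn.induct sep hs generalizing h t with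
  | case1 => simp [pvTokOn] at he; simp [he.1]
  | case2 c r hp ih =>
    rw [pvTokOn] at he; simp only [hp, if_true] at he
    have : h = [] := by cases he; rfl
    simp [this]
  | case3 c r hp ih =>
    rw [pvTokOn] at he; simp only [hp, if_false] at he
    have hne := pvTokOn_ne_nil sep hs r
    cases hX : pvTokOn sep hs r with
    | nil => exact absurd hX hne
    | cons a b =>
      rw [hX] at he
      simp [pvConsTok] at he
      obtain ⟨rfl, -⟩ := he
      have := ih a b hX
      exact List.cons_prefix_cons.mpr ⟨rfl, this⟩

-- the key invariant: F tokenizes like the one-pass scanner restricted to separators SEPC + " y "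
structure PvOK (SEPC : Char → Prop) (F : List Char → List (List Char)) : Prop where
  nil : F [] = [[]]
  ne : ∀ l, F l ≠ []
  cons : ∀ c p, ¬ SEPC c → List.isPrefixOf [' ', 'y', ' '] (c :: p) = false → F (c :: p) = pvConsTok [c] (F p)
  sep : ∀ c p, SEPC c → F (c :: p) = [] :: F p
  ystep : ∀ p, F (' ' :: 'y' :: ' ' :: p) = [] :: F p

theorem pvY_transfer (c : Char) (p h : List Char) (hpre : h <+: p)
    (hy : List.isPrefixOf [' ', 'y', ' '] (c :: p) = false) :
    List.isPrefixOf [' ', 'y', ' '] (c :: h) = false := by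
  by_contra hcontra
  have hh : List.isPrefixOf [' ', 'y', ' '] (c :: h) = true := by
    cases hhh : List.isPrefixOf [' ', 'y', ' '] (c :: h) with
    | false => exact absurd hhh hcontra
    | true => rfl
  rw [List.isPrefixOf_iff_prefix] at hh
  obtain ⟨hc, h2⟩ := List.cons_prefix_cons.mp hh
  have : ([' ', 'y', ' '] : List Char).isPrefixOf (c :: p) = true := by
    rw [List.isPrefixOf_iff_prefix]
    exact List.cons_prefix_cons.mpr ⟨hc, h2.trans hpre⟩
  rw [this] at hy; cases hy

theorem pvLift (s : Char) (hs1 : s ≠ ' ') (hs2 : s ≠ 'y') (SEPC : Char → Prop)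
    (F : List Char → List (List Char)) (hF : PvOK SEPC F) :
    PvOK (fun c => c = s ∨ SEPC c) (fun l => (PySem.Chars.splitOn l [s]).flatMap F) := by
  have hss : ([s] : List Char) ≠ [] := by simp
  have hpre_eq : ∀ (c : Char) (p : List Char), ([s] : List Char).isPrefixOf (c :: p) = (s == c) := by
    intro c p; simp [List.isPrefixOf]
  constructor
  · rw [pvSplitOn_nil [s] hss]; simp [hF.nil]
  · intro l
    cases hX : PySem.Chars.splitOn l [s] with
    | nil => exact absurd hX (pvSplitOn_ne_nil [s] hss l)
    | cons a b =>
      simp only [List.flatMap_cons]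
      intro h
      rcases List.append_eq_nil_iff.mp h with ⟨h1, -⟩
      exact hF.ne a h1
  · intro c p hc hy
    have hcs : c ≠ s := fun h => hc (Or.inl h)
    have hp : ¬ ([s] : List Char).isPrefixOf (c :: p) := by
      rw [hpre_eq]; simp [Ne.symm hcs]
    rw [pvSplitOn_neg [s] hss c p hp]
    cases hX : PySem.Chars.splitOn p [s] with
    | nil => exact absurd hX (pvSplitOn_ne_nil [s] hss p)
    | cons a b =>
      have hap : a <+: p := pvSplitOn_head_prefix [s] hss p a b hX
      simp only [pvConsTok, List.flatMap_cons, List.singleton_append]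
      rw [hF.cons c a (fun h => hc (Or.inr h)) (pvY_transfer c p a hap hy)]
      rw [pvConsTok_append [c] (F a) (b.flatMap F) (hF.ne a)]
      cases hFa : F a ++ List.flatMap F b <;> simp [pvConsTok]
  · intro c p hc
    by_cases hcs : c = s
    · subst hcs
      have hp : ([c] : List Char).isPrefixOf (c :: p) := by rw [hpre_eq]; simp
      rw [pvSplitOn_pos [c] hss c p hp]
      simp only [List.length_cons, List.length_nil, List.drop_succ_cons, List.drop_zero]
      simp [hF.nil]
    · have hsep : SEPC c := by rcases hc with h | h; exact absurd h hcs; exact h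
      have hp : ¬ ([s] : List Char).isPrefixOf (c :: p) := by
        rw [hpre_eq]; simp [Ne.symm hcs]
      rw [pvSplitOn_neg [s] hss c p hp]
      cases hX : PySem.Chars.splitOn p [s] with
      | nil => exact absurd hX (pvSplitOn_ne_nil [s] hss p)
      | cons a b =>
        simp only [pvConsTok, List.flatMap_cons, List.singleton_append]
        rw [hF.sep c a hsep]
        simp
  · intro p
    have hstep : ∀ (c : Char) (q : List Char), c ≠ s →
        PySem.Chars.splitOn (c :: q) [s] = pvConsTok [c] (PySem.Chars.splitOn q [s]) := by
      intro c q hcs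
      exact pvSplitOn_neg [s] hss c q (by rw [hpre_eq]; simp [Ne.symm hcs])
    rw [hstep ' ' _ (Ne.symm hs1), hstep 'y' _ (Ne.symm hs2), hstep ' ' _ (Ne.symm hs1)]
    rw [pvConsTok_consTok, pvConsTok_consTok]
    cases hX : PySem.Chars.splitOn p [s] with
    | nil => exact absurd hX (pvSplitOn_ne_nil [s] hss p)
    | cons a b =>
      simp only [pvConsTok, List.cons_append, List.nil_append, List.flatMap_cons]
      rw [hF.ystep a]
      simp

def pvYsep : List Char := [' ', 'y', ' ']

theorem pvYsep_ne : pvYsep ≠ [] := by simp [pvYsep]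

theorem pvChain1_ok : PvOK (fun _ => False) pvChain1 := by
  constructor
  · exact pvSplitOn_nil pvYsep pvYsep_ne
  · exact fun l => pvSplitOn_ne_nil pvYsep pvYsep_ne l
  · intro c p _ hy
    exact pvSplitOn_neg pvYsep pvYsep_ne c p (by simp [pvYsep, hy])
  · intro c p h; exact absurd h (fun h => h)
  · intro p
    have hp : pvYsep.isPrefixOf (' ' :: 'y' :: ' ' :: p) := by simp [pvYsep, List.isPrefixOf]
    have := pvSplitOn_pos pvYsep pvYsep_ne ' ' ('y' :: ' ' :: p) hp
    simpa [pvYsep, pvChain1] using this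

theorem pvChain5_ok :
    PvOK (fun c => c = ';' ∨ c = '/' ∨ c = ',' ∨ c = '&' ∨ False) pvChain5 := by
  have h2 : PvOK (fun c => c = '&' ∨ False) pvChain2 :=
    pvLift '&' (by decide) (by decide) _ pvChain1 pvChain1_ok
  have h3 : PvOK (fun c => c = ',' ∨ c = '&' ∨ False) pvChain3 :=
    pvLift ',' (by decide) (by decide) _ pvChain2 h2
  have h4 : PvOK (fun c => c = '/' ∨ c = ',' ∨ c = '&' ∨ False) pvChain4 :=
    pvLift '/' (by decide) (by decide) _ pvChain3 h3
  exact pvLift ';' (by decide) (by decide) _ pvChain4 h4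

theorem pvScan_ne_nil (l : List Char) : pvScan l ≠ [] := by
  induction l using pvScan.induct with
  | case1 => simp [pvScan]
  | case2 c r hc ih => simp [pvScan, hc]
  | case3 c r hc hy ih => simp only [pvScan]; simp [hc, hy]
  | case4 c r hc hy ih => simp only [pvScan]; simp [hc, hy]; exact pvConsTok_ne_nil _ _

-- MAIN LEMMA 1: A's five split passes compute B's one-pass tokenization
theorem pvChain5_eq_pvScan (l : List Char) : pvChain5 l = pvScan l := by
  induction l using pvScan.induct with
  | case1 => rw [pvChain5_ok.nil]; simp [pvScan]
  | case2 c r hc ih =>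
    rw [pvChain5_ok.sep c r (by tauto)]
    rw [ih]
    simp [pvScan, hc]
  | case3 c r hc hy ih =>
    have hy' := hy
    rw [List.isPrefixOf_iff_prefix] at hy'
    obtain ⟨hc1, hy2⟩ := List.cons_prefix_cons.mp hy'
    cases r with
    | nil => simp at hy2
    | cons a r1 =>
      obtain ⟨ha, hy3⟩ := List.cons_prefix_cons.mp hy2
      cases r1 with
      | nil => simp at hy3
      | cons a2 r2 =>
        obtain ⟨ha2, -⟩ := List.cons_prefix_cons.mp hy3
        subst hc1 ha ha2
        rw [pvChain5_ok.ystep r2]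
        simp only [List.drop_succ_cons, List.drop_zero] at ih
        rw [ih]
        conv_rhs => rw [pvScan]
        simp [hc, hy]
  | case4 c r hc hy ih =>
    have hyf : List.isPrefixOf [' ', 'y', ' '] (c :: r) = false := by
      cases h : List.isPrefixOf [' ', 'y', ' '] (c :: r) with
      | false => rfl
      | true => exact absurd h hy
    rw [pvChain5_ok.cons c r (by tauto) hyf, ih]
    conv_rhs => rw [pvScan]
    simp [hc, hy]

-- pvLoopB with its accumulators computes pvScan
theorem pvLoopB_eq (l : List Char) (toks : List (List Char)) (cur : List Char) :
    pvLoopB l toks cur = toks ++ pvConsTok cur (pvScan l) := by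
  induction l, toks, cur using pvLoopB.induct with
  | case1 toks cur => simp [pvLoopB, pvScan, pvConsTok]
  | case2 c r toks cur hc ih =>
    rw [pvLoopB]; rw [if_pos hc]
    rw [ih]
    have hne := pvScan_ne_nil r
    conv_rhs => rw [pvScan]
    rw [if_pos hc]
    cases hX : pvScan r with
    | nil => exact absurd hX hne
    | cons a b => simp [pvConsTok]
  | case3 c r toks cur hc hy ih =>
    rw [pvLoopB]; rw [if_neg hc, if_pos hy]
    rw [ih]
    have hne := pvScan_ne_nil (r.drop 2)
    conv_rhs => rw [pvScan]
    rw [if_neg hc, if_pos hy]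
    cases hX : pvScan (r.drop 2) with
    | nil => exact absurd hX hne
    | cons a b => simp [pvConsTok]
  | case4 c r toks cur hc hy ih =>
    rw [pvLoopB]; rw [if_neg hc, if_neg hy]
    rw [ih]
    conv_rhs => rw [pvScan]
    rw [if_neg hc, if_neg hy]
    rw [pvConsTok_consTok]

-- B's fused strip/dedupe pass equals dedup of the strip-filtered tokens
theorem pvDedup_eq (toks : List (List Char)) (s : List (List Char)) :
    (toks.foldl
      (fun (acc : PySem.Set (List Char) × List (List Char)) tok =>
        if PySem.Chars.strip tok ≠ [] ∧ acc.1.contains (PySem.Chars.strip tok) = false then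
          (PySem.Set.add acc.1 (PySem.Chars.strip tok), acc.2 ++ [PySem.Chars.strip tok])
        else acc) (s, s)) =
    (((toks.filter (fun p => PySem.Chars.strip p ≠ [])).map PySem.Chars.strip).foldl PySem.Set.add s,
     ((toks.filter (fun p => PySem.Chars.strip p ≠ [])).map PySem.Chars.strip).foldl PySem.Set.add s) := by
  induction toks generalizing s with
  | nil => simp
  | cons tok r ih =>
    simp only [List.foldl_cons, List.filter_cons]
    by_cases ht : PySem.Chars.strip tok = []
    · simp only [ht]
      rw [if_neg (by simp)]
      simp only [decide_eq_true_eq]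
      exact ih s
    · rw [if_pos (by simp [ht] : decide (PySem.Chars.strip tok ≠ []) = true)]
      simp only [List.map_cons, List.foldl_cons]
      by_cases hcont : List.contains s (PySem.Chars.strip tok)
      · have hmem : PySem.Chars.strip tok ∈ s := by simpa using hcont
        have hadd : PySem.Set.add s (PySem.Chars.strip tok) = s := by
          simp [PySem.Set.add, hmem]
        rw [if_neg (by simp [hmem])]
        rw [hadd]
        exact ih s
      · rw [Bool.not_eq_true] at hcont
        have hmem : PySem.Chars.strip tok ∉ s := by simpa using hcont
        have hadd : PySem.Set.add s (PySem.Chars.strip tok) = s ++ [PySem.Chars.strip tok] := by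
          simp [PySem.Set.add, hmem]
        rw [if_pos ⟨ht, hcont⟩]
        simp only [hadd]
        exact ih (s ++ [PySem.Chars.strip tok])

-- A's inner per-separator pass is a flatMap of the split
theorem pvInner (sep : List Char) (hs : sep ≠ []) (P : List (List Char)) :
    P.foldl (fun np part =>
      if PySem.Chars.isIn sep part then np ++ PySem.Chars.splitOn part sep else np ++ [part]) [] =
    P.flatMap (fun part => PySem.Chars.splitOn part sep) := by
  have hfun : (fun (np : List (List Char)) part =>
      if PySem.Chars.isIn sep part then np ++ PySem.Chars.splitOn part sep else np ++ [part])
      = (fun np part => np ++ PySem.Chars.splitOn part sep) := by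
    funext np part
    by_cases h : PySem.Chars.isIn sep part
    · rw [if_pos h]
    · have hb : PySem.Chars.isIn sep part = false := by
        cases hh : PySem.Chars.isIn sep part with
        | false => rfl
        | true => exact absurd hh h
      rw [if_neg h, pvSplitOn_single sep hs part hb]
  rw [hfun, PySem.List.foldl_append_eq_flatMap]
  simp

theorem pvChainsAssemble (t : List Char) :
    (((((PySem.Chars.splitOn t [';']).flatMap (fun p => PySem.Chars.splitOn p ['/'])).flatMap
      (fun p => PySem.Chars.splitOn p [','])).flatMap
      (fun p => PySem.Chars.splitOn p ['&'])).flatMap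
      (fun p => PySem.Chars.splitOn p [' ', 'y', ' '])) = pvChain5 t := by
  simp only [pvChain5]
  rw [show pvChain4 = fun l => List.flatMap pvChain3 (PySem.Chars.splitOn l ['/']) from rfl]
  rw [show pvChain3 = fun l => List.flatMap pvChain2 (PySem.Chars.splitOn l [',']) from rfl]
  rw [show pvChain2 = fun l => List.flatMap pvChain1 (PySem.Chars.splitOn l ['&']) from rfl]
  rw [show pvChain1 = fun l => PySem.Chars.splitOn l [' ', 'y', ' '] from rfl]
  simp only [List.flatMap_assoc]

-- ===== VERDICT (by name: the statement is the Claim_ definition above) =====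
theorem split_responsables_spec : Claim_equal_split_responsables := by
  intro value _
  unfold Spec_split_responsables split_responsables split_responsables_alt
  by_cases hguard : PySem.Chars.strip (value.getD "").toList = [] ∨
      PySem.Chars.lower (PySem.Chars.strip (value.getD "").toList) = "nan".toList ∨
      PySem.Chars.lower (PySem.Chars.strip (value.getD "").toList) = "none".toList
  · rw [if_pos hguard, if_pos hguard]
  · rw [if_neg hguard, if_neg hguard]
    simp only [List.foldl_cons, List.foldl_nil]
    have h1 : (if PySem.Chars.isIn [';'] (PySem.Chars.strip (value.getD "").toList) = true then
          [] ++ PySem.Chars.splitOn (PySem.Chars.strip (value.getD "").toList) [';']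
        else [] ++ [PySem.Chars.strip (value.getD "").toList]) =
        PySem.Chars.splitOn (PySem.Chars.strip (value.getD "").toList) [';'] := by
      by_cases h : PySem.Chars.isIn [';'] (PySem.Chars.strip (value.getD "").toList) = true
      · rw [if_pos h]; simp
      · rw [if_neg h, pvSplitOn_single [';'] (by simp) _ (Bool.not_eq_true _ ▸ h)]; simp
    rw [h1]
    rw [pvInner ['/'] (by simp), pvInner [','] (by simp),
        pvInner ['&'] (by simp), pvInner [' ', 'y', ' '] (by simp)]
    rw [pvChainsAssemble, pvChain5_eq_pvScan]
    rw [pvLoopB_eq _ [] []]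
    have hne := pvScan_ne_nil (PySem.Chars.strip (value.getD "").toList)
    cases hX : pvScan (PySem.Chars.strip (value.getD "").toList) with
    | nil => exact absurd hX hne
    | cons a b =>
      simp only [List.nil_append, pvConsTok, List.nil_append]
      simp only [PySem.Set.empty]
      rw [pvDedup_eq]
      rfl
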